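-- pv_equiv track=rewrite | github.com/acmeism/RosettaCodeData | Task/Colorful-numbers/Python/colorful-numbers.py | iscolorful
-- ===== SOURCE A (Python) =====
-- from math import prod
--
-- largest = [0]
--
-- def iscolorful(n):
--     if 0 <= n < 10:
--         return True
--     dig = [int(c) for c in str(n)]
--     if 1 in dig or 0 in dig or len(dig) > len(set(dig)):
--         return False
--     products = list(set(dig))
--     for i in range(len(dig)):
--         for j in range(i+2, len(dig)+1):
--             p = prod(dig[i:j])
--             if p in products:
--                 return False
--             products.append(p)
--
--     largest[0] = max(n, largest[0])
--     return True
-- ===== SOURCE B (Python) =====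
-- largest = [0]
--
-- def iscolorful(n):
--     if 0 <= n < 10:
--         return True
--     dig = [int(c) for c in str(n)]
--     if 1 in dig or 0 in dig or len(dig) > len(set(dig)):
--         return False
--     # build every value once (digits, then running products of each contiguous
--     # run of length >= 2), then do a single global uniqueness test
--     vals = list(dig)
--     for i in range(len(dig)):
--         p = dig[i]
--         for d in dig[i + 1:]:
--             p *= d
--             vals.append(p)
--     if len(vals) == len(set(vals)):
--         largest[0] = max(n, largest[0])
--         return True
--     return False
-- ===== Notes on version B (the rewrite author's own statement) =====
-- stated objective: alternative
-- what changed: A checks each candidate product against an incrementally grown membership list and early-returns on the first collision; B builds the whole value list once (digits plus running products of every contiguous run, each product obtained by one multiplication from the previous instead of recomputing prod over a slice) and decides with a single len(vals)==len(set(vals)) comparison.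
import Mathlib
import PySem

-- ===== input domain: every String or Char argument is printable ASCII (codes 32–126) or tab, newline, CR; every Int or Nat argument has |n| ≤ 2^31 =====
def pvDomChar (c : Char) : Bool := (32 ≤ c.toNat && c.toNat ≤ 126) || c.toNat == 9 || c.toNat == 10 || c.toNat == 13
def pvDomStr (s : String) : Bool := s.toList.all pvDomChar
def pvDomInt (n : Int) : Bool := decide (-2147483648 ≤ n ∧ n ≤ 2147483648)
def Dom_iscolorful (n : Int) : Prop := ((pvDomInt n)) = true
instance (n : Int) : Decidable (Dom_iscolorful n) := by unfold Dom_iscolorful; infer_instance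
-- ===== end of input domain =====

-- B builds all digit/contiguous-product values once (running products) and does a single
-- uniqueness test, instead of A's grow-a-membership-list-and-early-return scan; same results.
-- Both Pythons also update the module-level 'largest' identically on success (return value is
-- what is proved here; the mutation is reproduced unchanged in Source B).

-- ===== PORT A =====
-- dig = [int(c) for c in str(n)] (shared literally by both Pythons); none = ValueError
def pvDigits? (n : Int) : Option (List Int) :=
  (PySem.Int.toChars n).mapM (fun c => PySem.Int.ofChars? [c])

-- inner 'for j in range(i+2, len(dig)+1)' loop of A, with early return as Option state
def aInner (dig : List Int) (i : Int) (acc : Option (List Int)) : Option (List Int) :=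
  (PySem.List.pyRange (i + 2) ((dig.length : Int) + 1) 1).foldl
    (fun acc j =>
      match acc with
      | none => none
      | some products =>
        let p := (PySem.List.slice dig (some i) (some j)).foldl (fun a x => a * x) 1
        if products.contains p then none else some (products ++ [p]))
    acc

def iscolorful (n : Int) : Bool :=
  if 0 ≤ n ∧ n < 10 then true
  else
    match pvDigits? n with
    | none => false   -- Python raises ValueError here (the '-' sign of a negative n); excluded by Pre_
    | some dig =>
      if dig.contains 1 || dig.contains 0
          || decide (dig.length > (PySem.Set.ofList dig).length) then false
      else
        match (PySem.List.pyRange 0 (dig.length : Int) 1).foldl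
            (fun acc i => aInner dig i acc) (some (PySem.Set.ofList dig)) with
        | none => false
        | some _ => true

-- ===== PORT B =====
def iscolorful_alt (n : Int) : Bool :=
  if 0 ≤ n ∧ n < 10 then true
  else
    match pvDigits? n with
    | none => false   -- Python raises ValueError here (the '-' sign of a negative n); excluded by Pre_
    | some dig =>
      if dig.contains 1 || dig.contains 0
          || decide (dig.length > (PySem.Set.ofList dig).length) then false
      else
        -- vals = list(dig); running products appended for every contiguous run of length ≥ 2
        let vals := (PySem.List.pyRange 0 (dig.length : Int) 1).foldl
          (fun vals i =>
            ((PySem.List.slice dig (some (i + 1)) none).foldl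
              (fun (st : Int × List Int) d => (st.1 * d, st.2 ++ [st.1 * d]))
              (PySem.List.pyGetD dig i 0, vals)).2)   -- dig[i]: i is in range here, pyGetD is exact
          dig
        decide (vals.length = (PySem.Set.ofList vals).length)

-- ===== PRECONDITION & SPEC =====
-- Pre_ excludes negative arguments, on which both Pythons raise ValueError at int('-').
def Pre_iscolorful (n : Int) : Prop := 0 ≤ n
instance (n : Int) : Decidable (Pre_iscolorful n) := by unfold Pre_iscolorful; infer_instance
def pvWitness_iscolorful : Int := (3245)

def Spec_iscolorful (n : Int) (out : Bool) : Prop := out = iscolorful_alt n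
instance (n : Int) (out : Bool) : Decidable (Spec_iscolorful n out) := by unfold Spec_iscolorful; infer_instance

-- ===== CLAIM (what is proved, stated in full; the proofs are below) =====
def Claim_equal_iscolorful : Prop := ∀ (n : Int), Dom_iscolorful n → Pre_iscolorful n → Spec_iscolorful n (iscolorful n)

-- ===== LEMMAS AND PROOFS =====

-- A's loop step, as a function of the candidate product
def pvF (acc : Option (List Int)) (p : Int) : Option (List Int) :=
  match acc with
  | none => none
  | some products => if products.contains p then none else some (products ++ [p])

-- the products A tests for a fixed i, in order
def pvAprods (dig : List Int) (i : Int) : List Int :=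
  (PySem.List.pyRange (i + 2) ((dig.length : Int) + 1) 1).map
    (fun j => (PySem.List.slice dig (some i) (some j)).foldl (fun a x => a * x) 1)

-- the running products B appends for a fixed start digit p over the rest xs
def pvRunProds (p : Int) : List Int → List Int
  | [] => []
  | x :: xs => (p * x) :: pvRunProds (p * x) xs

theorem pvFoldlAddSublist : ∀ (xs acc bcc : List Int), List.Sublist acc bcc →
    List.Sublist (xs.foldl PySem.Set.add acc) (bcc ++ xs) := by
  intro xs
  induction xs with
  | nil => intro acc bcc h; simpa using h
  | cons x xs ih =>
    intro acc bcc h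
    have h2 : List.Sublist (PySem.Set.add acc x) (bcc ++ [x]) := by
      unfold PySem.Set.add
      split
      · exact h.trans (List.sublist_append_left bcc [x])
      · exact h.append (List.Sublist.refl [x])
    have h3 := ih (PySem.Set.add acc x) (bcc ++ [x]) h2
    simpa [List.append_assoc] using h3

theorem pvOfListSublist (xs : List Int) : List.Sublist (PySem.Set.ofList xs) xs := by
  have h := pvFoldlAddSublist xs [] [] (List.Sublist.refl [])
  simpa [PySem.Set.ofList_eq_foldl] using h

theorem pvFoldlAddNodup : ∀ (xs acc : List Int), xs.Nodup → (∀ x ∈ xs, x ∉ acc) →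
    xs.foldl PySem.Set.add acc = acc ++ xs := by
  intro xs
  induction xs with
  | nil => intro acc _ _; simp
  | cons x xs ih =>
    intro acc hnd hdis
    have hx : x ∉ acc := hdis x (List.mem_cons_self)
    have hstep : PySem.Set.add acc x = acc ++ [x] := by
      unfold PySem.Set.add
      simp [hx]
    have hnd' : xs.Nodup := (List.nodup_cons.mp hnd).2
    have hx' : x ∉ xs := (List.nodup_cons.mp hnd).1
    have hdis' : ∀ y ∈ xs, y ∉ acc ++ [x] := by
      intro y hy
      simp only [List.mem_append, List.mem_singleton]
      rintro (h | rfl)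
      · exact hdis y (List.mem_cons_of_mem _ hy) h
      · exact hx' hy
    calc (x :: xs).foldl PySem.Set.add acc = xs.foldl PySem.Set.add (acc ++ [x]) := by
            simp [hstep]
      _ = (acc ++ [x]) ++ xs := ih (acc ++ [x]) hnd' hdis'
      _ = acc ++ x :: xs := by simp

theorem pvOfListOfNodup (xs : List Int) (h : xs.Nodup) : PySem.Set.ofList xs = xs := by
  have := pvFoldlAddNodup xs [] h (by simp)
  simpa [PySem.Set.ofList_eq_foldl] using this

theorem pvNodupOfLenLe (xs : List Int) (h : xs.length ≤ (PySem.Set.ofList xs).length) :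
    xs.Nodup ∧ PySem.Set.ofList xs = xs := by
  have heq : PySem.Set.ofList xs = xs := (pvOfListSublist xs).eq_of_length_le h
  exact ⟨heq ▸ PySem.Set.nodup_ofList xs, heq⟩

theorem pvLenSetIff (xs : List Int) :
    (xs.length = (PySem.Set.ofList xs).length) ↔ xs.Nodup := by
  constructor
  · intro h; exact (pvNodupOfLenLe xs h.le).1
  · intro h; rw [pvOfListOfNodup xs h]

theorem pvFoldlFNone : ∀ ps : List Int, ps.foldl pvF none = none := by
  intro ps; induction ps with
  | nil => rfl
  | cons p ps ih => simpa [pvF] using ih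

theorem pvFoldlF : ∀ (ps init : List Int), init.Nodup →
    ps.foldl pvF (some init) =
      if (init ++ ps).Nodup then some (init ++ ps) else none := by
  intro ps
  induction ps with
  | nil => intro init h; simp [h]
  | cons p ps ih =>
    intro init h
    by_cases hp : p ∈ init
    · have hnn : ¬ (init ++ p :: ps).Nodup := by
        rw [List.nodup_append]
        rintro ⟨-, -, hdis⟩
        exact hdis p hp p List.mem_cons_self rfl
      have hstep : pvF (some init) p = none := by simp [pvF, hp]
      rw [List.foldl_cons, hstep, pvFoldlFNone ps, if_neg hnn]
    · have h' : (init ++ [p]).Nodup := by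
        rw [List.nodup_append]
        refine ⟨h, List.nodup_singleton p, ?_⟩
        intro a ha b hb
        simp only [List.mem_singleton] at hb
        exact fun he => hp ((he.trans hb) ▸ ha)
      have hstep : pvF (some init) p = some (init ++ [p]) := by simp [pvF, hp]
      rw [List.foldl_cons, hstep, ih (init ++ [p]) h']
      simp

theorem pvFoldlFlatMap (g : Int → List Int) : ∀ (l : List Int) (a : Option (List Int)),
    (l.flatMap g).foldl pvF a = l.foldl (fun a i => (g i).foldl pvF a) a := by
  intro l
  induction l with
  | nil => intro a; simp
  | cons x l ih => intro a; simp [List.foldl_append, ih]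

theorem pvFlatMapCongr (f g : Int → List Int) : ∀ (l : List Int),
    (∀ x ∈ l, f x = g x) → l.flatMap f = l.flatMap g := by
  intro l
  induction l with
  | nil => intro _; simp
  | cons x l ih =>
    intro h
    simp only [List.flatMap_cons, h x (List.mem_cons_self ..),
      ih (fun y hy => h y (List.mem_cons_of_mem _ hy))]

theorem pvAInnerEq (dig : List Int) (i : Int) (acc : Option (List Int)) :
    aInner dig i acc = (pvAprods dig i).foldl pvF acc := by
  unfold aInner pvAprods
  rw [List.foldl_map]
  rfl

theorem pvBInnerEq : ∀ (xs : List Int) (p : Int) (vals : List Int),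
    (xs.foldl (fun (st : Int × List Int) d => (st.1 * d, st.2 ++ [st.1 * d])) (p, vals)).2
      = vals ++ pvRunProds p xs := by
  intro xs
  induction xs with
  | nil => intro p vals; simp [pvRunProds]
  | cons x xs ih => intro p vals; simp [pvRunProds, ih]

theorem pvRunProdsEq (xs : List Int) : ∀ p : Int,
    pvRunProds p xs =
      (List.range xs.length).map (fun m => ((xs.take (m + 1)).foldl (fun a x => a * x) p)) := by
  induction xs with
  | nil => intro p; simp [pvRunProds]
  | cons x xs ih =>
    intro p
    rw [List.length_cons, List.range_succ_eq_map, List.map_cons, List.map_map]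
    simp only [pvRunProds, ih (p * x)]
    congr 1

theorem pvProdsEq (dig : List Int) (k : Nat) (hk : k < dig.length) :
    pvAprods dig (k : Int) = pvRunProds dig[k] (dig.drop (k + 1)) := by
  rw [pvRunProdsEq]
  unfold pvAprods
  rw [PySem.List.pyRange_one, List.map_map]
  have hN : (((dig.length : Int) + 1) - ((k : Int) + 2)).toNat = dig.length - (k + 1) := by omega
  rw [hN]
  have hlen : (dig.drop (k + 1)).length = dig.length - (k + 1) := by simp
  rw [← hlen]
  apply List.map_congr_left
  intro m hm
  have hm' : m < (dig.drop (k + 1)).length := List.mem_range.mp hm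
  simp only [Function.comp_apply]
  have hcast : ((k : Int) + 2) + (m : Int) = (k : Int) + ((m + 2 : Nat) : Int) := by
    push_cast; ring
  rw [hcast, PySem.List.slice_natCast_add]
  rw [List.drop_eq_getElem_cons hk]
  have : m + 2 = (m + 1) + 1 := by omega
  rw [this, List.take_succ_cons, List.foldl_cons, one_mul]

theorem pvFinal (dig P : List Int) (hnd : dig.Nodup) :
    (match P.foldl pvF (some dig) with
      | none => false
      | some _ => true)
    = decide ((dig ++ P).length = (PySem.Set.ofList (dig ++ P)).length) := by
  rw [pvFoldlF P dig hnd]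
  by_cases hnv : (dig ++ P).Nodup
  · rw [if_pos hnv]
    simp [(pvLenSetIff (dig ++ P)).mpr hnv]
  · rw [if_neg hnv]
    have h2 : ¬ (dig.length + P.length = (PySem.Set.ofList (dig ++ P)).length) := by
      intro h
      exact hnv ((pvLenSetIff _).mp (by simpa using h))
    simp [h2]

theorem pvCore (dig : List Int) (hnd : dig.Nodup) :
    (match (PySem.List.pyRange 0 (dig.length : Int) 1).foldl
        (fun acc i => aInner dig i acc) (some (PySem.Set.ofList dig)) with
      | none => false
      | some _ => true)
    = (decide (((PySem.List.pyRange 0 (dig.length : Int) 1).foldl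
          (fun vals i =>
            ((PySem.List.slice dig (some (i + 1)) none).foldl
              (fun (st : Int × List Int) d => (st.1 * d, st.2 ++ [st.1 * d]))
              (PySem.List.pyGetD dig i 0, vals)).2)
          dig).length =
        (PySem.Set.ofList ((PySem.List.pyRange 0 (dig.length : Int) 1).foldl
          (fun vals i =>
            ((PySem.List.slice dig (some (i + 1)) none).foldl
              (fun (st : Int × List Int) d => (st.1 * d, st.2 ++ [st.1 * d]))
              (PySem.List.pyGetD dig i 0, vals)).2)
          dig)).length)) := by
  -- both sides reduce to nodup-ness of dig ++ (all contiguous products, in loop order)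
  have hA : (PySem.List.pyRange 0 (dig.length : Int) 1).foldl
      (fun acc i => aInner dig i acc) (some (PySem.Set.ofList dig))
      = ((PySem.List.pyRange 0 (dig.length : Int) 1).flatMap (fun i => pvAprods dig i)).foldl
          pvF (some dig) := by
    have hfun : (fun (acc : Option (List Int)) (i : Int) => aInner dig i acc)
        = fun acc i => (pvAprods dig i).foldl pvF acc :=
      funext fun acc => funext fun i => pvAInnerEq dig i acc
    rw [hfun, ← pvFoldlFlatMap, pvOfListOfNodup dig hnd]
  have hB : (PySem.List.pyRange 0 (dig.length : Int) 1).foldl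
      (fun vals i =>
        ((PySem.List.slice dig (some (i + 1)) none).foldl
          (fun (st : Int × List Int) d => (st.1 * d, st.2 ++ [st.1 * d]))
          (PySem.List.pyGetD dig i 0, vals)).2)
      dig
      = dig ++ (PySem.List.pyRange 0 (dig.length : Int) 1).flatMap
          (fun i => pvRunProds (PySem.List.pyGetD dig i 0)
            (PySem.List.slice dig (some (i + 1)) none)) := by
    rw [show (fun (vals : List Int) (i : Int) =>
        ((PySem.List.slice dig (some (i + 1)) none).foldl
          (fun (st : Int × List Int) d => (st.1 * d, st.2 ++ [st.1 * d]))
          (PySem.List.pyGetD dig i 0, vals)).2)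
      = (fun vals i => vals ++ pvRunProds (PySem.List.pyGetD dig i 0)
          (PySem.List.slice dig (some (i + 1)) none)) from
        funext fun vals => funext fun i => pvBInnerEq _ _ _]
    exact PySem.List.foldl_append_eq_flatMap _ _ _
  have hflat : (PySem.List.pyRange 0 (dig.length : Int) 1).flatMap (fun i => pvAprods dig i)
      = (PySem.List.pyRange 0 (dig.length : Int) 1).flatMap
          (fun i => pvRunProds (PySem.List.pyGetD dig i 0)
            (PySem.List.slice dig (some (i + 1)) none)) := by
    apply pvFlatMapCongr
    intro i hi
    have hi' := (PySem.List.mem_pyRange_one).mp hi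
    obtain ⟨k, rfl⟩ : ∃ k : Nat, i = (k : Int) := ⟨i.toNat, (Int.toNat_of_nonneg hi'.1).symm⟩
    have hk : k < dig.length := by exact_mod_cast hi'.2
    have hslice : PySem.List.slice dig (some ((k : Int) + 1)) none = dig.drop (k + 1) := by
      have : ((k : Int) + 1) = ((k + 1 : Nat) : Int) := by push_cast; ring
      rw [this, PySem.List.slice_from_natCast]
    have hget : PySem.List.pyGetD dig (k : Int) 0 = dig[k] := by
      rw [PySem.List.pyGetD_natCast, List.getD_eq_getElem dig 0 hk]
    rw [hslice, hget, pvProdsEq dig k hk]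
  rw [hA, hB, ← hflat]
  exact pvFinal dig _ hnd

-- ===== VERDICT (by name: the statement is the Claim_ definition above) =====
theorem iscolorful_spec : Claim_equal_iscolorful := by
  intro n _ _
  unfold Spec_iscolorful iscolorful iscolorful_alt
  by_cases h10 : 0 ≤ n ∧ n < 10
  · simp [h10]
  · simp only [if_neg h10]
    cases hd : pvDigits? n with
    | none => rfl
    | some dig =>
      dsimp only
      by_cases hg : (dig.contains 1 || dig.contains 0
          || decide (dig.length > (PySem.Set.ofList dig).length)) = true
      · rw [if_pos hg, if_pos hg]
      · have hb : (dig.contains 1 || dig.contains 0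
            || decide (dig.length > (PySem.Set.ofList dig).length)) = false :=
          Bool.eq_false_iff.mpr hg
        have h3 : decide (dig.length > (PySem.Set.ofList dig).length) = false :=
          (Bool.or_eq_false_iff.mp hb).2
        have hle : dig.length ≤ (PySem.Set.ofList dig).length := by
          simpa using of_decide_eq_false h3
        have hnd := (pvNodupOfLenLe dig hle).1
        rw [if_neg hg, if_neg hg]
        exact pvCore dig hnd
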